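-- pv_equiv track=rewrite | github.com/balloonio/algorithms | lintcode/ladders/advanced_algorithm/3_stack_deque_heap/510_maximal_rectangle.py | get_prerow_sum
-- ===== SOURCE A (Python) =====
-- def get_prerow_sum(m):
--     ps = [[] for _ in range(len(m))]
--
--     for i in range(len(m)):
--         ps[i] = [
--             (((ps[i - 1][x] if i - 1 >= 0 else 0) + 1) if m[i][x] else 0)
--             for x in range(len(m[0]))
--         ]
--
--     return ps
-- ===== SOURCE B (Python) =====
-- def get_prerow_sum(m):
--     # Column-major: one running consecutive-truthy counter per column, then
--     # assemble the rows from the computed columns.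
--     if not m:
--         return []
--     cols = len(m[0])
--     col_runs = []
--     for x in range(cols):
--         run = 0
--         col = []
--         for row in m:
--             run = run + 1 if row[x] else 0
--             col.append(run)
--         col_runs.append(col)
--     return [[col_runs[x][i] for x in range(cols)] for i in range(len(m))]
-- ===== Notes on version B (the rewrite author's own statement) =====
-- stated objective: alternative
-- what changed: B traverses column-major with a single scalar run-counter per column (then assembles the rows), instead of A's row-major pass that preallocates the output and reads the whole previous output row via index arithmetic.
import Mathlib
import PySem

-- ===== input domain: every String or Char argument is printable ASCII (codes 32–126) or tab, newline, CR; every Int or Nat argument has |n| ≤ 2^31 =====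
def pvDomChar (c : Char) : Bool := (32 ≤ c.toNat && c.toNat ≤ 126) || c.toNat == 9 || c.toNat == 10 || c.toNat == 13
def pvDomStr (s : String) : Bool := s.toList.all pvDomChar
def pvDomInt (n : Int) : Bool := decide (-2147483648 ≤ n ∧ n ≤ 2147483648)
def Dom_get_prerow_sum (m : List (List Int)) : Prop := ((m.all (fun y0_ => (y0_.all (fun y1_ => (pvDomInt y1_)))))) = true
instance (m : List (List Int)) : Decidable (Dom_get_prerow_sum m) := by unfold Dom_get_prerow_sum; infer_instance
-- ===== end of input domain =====

-- B computes the same consecutive-ones prefix matrix column-major with one running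
-- counter per column (then assembles the rows); an alternative decomposition, same cost.


-- ===== PORT A =====
-- A: preallocate ps as len(m) empty rows, then for each i build row i from
-- row i-1 of ps with a comprehension over range(len(m[0])).
def get_prerow_sum (m : List (List Int)) : List (List Int) :=
  let ps : List (List Int) := m.map (fun _ => ([] : List Int))
  (List.range m.length).foldl
    (fun ps i =>
      ps.set i ((List.range (m.headD []).length).map (fun x =>
        if (m.getD i []).getD x 0 ≠ 0 then
          (if 1 ≤ i then (ps.getD (i - 1) []).getD x 0 else 0) + 1
        else 0)))
    ps

-- ===== PORT B =====
-- B-side helper: the inner 'for row in m' loop of Source B — running counter per column,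
-- emitting the column of run lengths.
def pvRuns (x : Nat) (run : Int) : List (List Int) → List Int
  | [] => []
  | r :: rest =>
    let run' : Int := if r.getD x 0 ≠ 0 then run + 1 else 0
    run' :: pvRuns x run' rest

def get_prerow_sum_alt (m : List (List Int)) : List (List Int) :=
  match m with
  | [] => []
  | m0 :: _ =>
    let cols := m0.length
    let colRuns : List (List Int) := (List.range cols).map (fun x => pvRuns x 0 m)
    (List.range m.length).map (fun i =>
      (List.range cols).map (fun x => (colRuns.getD x []).getD i 0))

-- ===== PRECONDITION & SPEC =====
-- Pre_ excludes exactly the ragged inputs on which Python A raises IndexError: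
-- some row shorter than the first row (m[i][x] for x < len(m[0]) fails).
def Pre_get_prerow_sum (m : List (List Int)) : Prop :=
  ∀ r ∈ m, (m.headD []).length ≤ r.length
instance (m : List (List Int)) : Decidable (Pre_get_prerow_sum m) := by
  unfold Pre_get_prerow_sum; infer_instance

def pvWitness_get_prerow_sum : List (List Int) := [[1, 0], [1, 1], [0, 1]]

def Spec_get_prerow_sum (m : List (List Int)) (out : List (List Int)) : Prop := out = get_prerow_sum_alt m
instance (m : List (List Int)) (out : List (List Int)) : Decidable (Spec_get_prerow_sum m out) := by unfold Spec_get_prerow_sum; infer_instance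

-- ===== CLAIM (what is proved, stated in full; the proofs are below) =====
def Claim_equal_get_prerow_sum : Prop := ∀ (m : List (List Int)), Dom_get_prerow_sum m → Pre_get_prerow_sum m → Spec_get_prerow_sum m (get_prerow_sum m)

-- ===== LEMMAS AND PROOFS =====

-- the value both programs put at row i, column x
def pvG (m : List (List Int)) (x i : Nat) : Int := (pvRuns x 0 m).getD i 0

-- the recurrence satisfied by a column of run lengths
theorem pvRuns_getD_rec (m : List (List Int)) (x : Nat) (run : Int) (i : Nat)
    (hi : i < m.length) :
    (pvRuns x run m).getD i 0 =
      if (m.getD i []).getD x 0 ≠ 0 then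
        (if i = 0 then run else (pvRuns x run m).getD (i - 1) 0) + 1
      else 0 := by
  induction m generalizing run i with
  | nil => simp at hi
  | cons r rest ih =>
    cases i with
    | zero => simp [pvRuns]
    | succ j =>
      have hj : j < rest.length := by simpa using hi
      have := ih (run := if r.getD x 0 ≠ 0 then run + 1 else 0) (i := j) hj
      simp only [pvRuns, List.getD_cons_succ] at this ⊢
      rw [this]
      cases j with
      | zero => simp
      | succ k => simp

-- a row of the common specification
def pvRow (m : List (List Int)) (i : Nat) : List Int :=
  (List.range (m.headD []).length).map (fun x => pvG m x i)

theorem pvRow_getD (m : List (List Int)) (i x : Nat) (hx : x < (m.headD []).length) :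
    (pvRow m i).getD x 0 = pvG m x i := by
  unfold pvRow
  rw [List.getD_eq_getElem _ _ (by simpa using hx)]
  simp

-- A's fold invariant: after k steps, the first k rows are the spec rows and the
-- remaining rows are the untouched empty placeholders.
theorem A_fold_invariant (m : List (List Int)) (k : Nat) (hk : k ≤ m.length) :
    (List.range k).foldl
      (fun ps i =>
        ps.set i ((List.range (m.headD []).length).map (fun x =>
          if (m.getD i []).getD x 0 ≠ 0 then
            (if 1 ≤ i then (ps.getD (i - 1) []).getD x 0 else 0) + 1
          else 0)))
      (m.map (fun _ => ([] : List Int)))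
    = (List.range k).map (pvRow m) ++ List.replicate (m.length - k) [] := by
  induction k with
  | zero => simp [List.map_const']
  | succ k ih =>
    have hk' : k ≤ m.length := Nat.le_of_succ_le hk
    have hkm : k < m.length := hk
    rw [List.range_succ, List.foldl_append, ih hk', List.foldl_cons, List.foldl_nil,
        List.map_append]
    -- the newly computed row is the spec row k
    have hrow :
        ((List.range (m.headD []).length).map (fun x =>
          if (m.getD k []).getD x 0 ≠ 0 then
            (if 1 ≤ k then
              ((((List.range k).map (pvRow m) ++ List.replicate (m.length - k) []).getD (k-1) []).getD x 0)
            else 0) + 1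
          else 0)) = pvRow m k := by
      refine (List.map_congr_left ?_ : _ = (List.range (m.headD []).length).map (fun x => pvG m x k))
      intro x hx
      have hxlt : x < (m.headD []).length := List.mem_range.mp hx
      have hprev : 1 ≤ k →
          ((((List.range k).map (pvRow m) ++ List.replicate (m.length - k) []).getD (k-1) []).getD x 0)
            = pvG m x (k-1) := by
        intro h1
        have hlt : k - 1 < ((List.range k).map (pvRow m)).length := by simp; omega
        have h2 : (((List.range k).map (pvRow m) ++ List.replicate (m.length - k) []).getD (k-1) [])
            = pvRow m (k-1) := by
          rw [List.getD_eq_getElem _ _ (by simp; omega), List.getElem_append_left hlt,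
              List.getElem_map, List.getElem_range]
        rw [h2]
        exact pvRow_getD m (k-1) x hxlt
      rw [pvG, pvRuns_getD_rec m x 0 k hkm]
      by_cases hz : (m.getD k []).getD x 0 ≠ 0
      · rw [if_pos hz, if_pos hz]
        congr 1
        by_cases h1 : 1 ≤ k
        · rw [if_pos h1, if_neg (by omega : ¬ k = 0), hprev h1]
          rfl
        · rw [if_neg h1, if_pos (by omega : k = 0)]
      · rw [if_neg hz, if_neg hz]
    rw [hrow]
    -- setting index k replaces the head of the replicate block
    have hrep : m.length - k = (m.length - (k + 1)) + 1 := by omega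
    rw [hrep, List.replicate_succ]
    rw [List.set_append_right _ _ (by simp)]
    simp [List.append_assoc]

theorem A_char (m : List (List Int)) :
    get_prerow_sum m = (List.range m.length).map (pvRow m) := by
  unfold get_prerow_sum
  have := A_fold_invariant m m.length (le_refl _)
  simpa using this

theorem B_char (m : List (List Int)) :
    get_prerow_sum_alt m = (List.range m.length).map (pvRow m) := by
  cases m with
  | nil => rfl
  | cons m0 rest =>
    unfold get_prerow_sum_alt
    simp only
    refine List.map_congr_left ?_
    intro i hi
    unfold pvRow
    refine List.map_congr_left ?_
    intro x hx
    have hxlt : x < m0.length := List.mem_range.mp hx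
    have : (((List.range m0.length).map (fun x => pvRuns x 0 (m0 :: rest))).getD x []) = pvRuns x 0 (m0 :: rest) := by
      rw [List.getD_eq_getElem _ _ (by simpa using hxlt)]
      simp
    rw [this]
    rfl

-- ===== VERDICT (by name: the statement is the Claim_ definition above) =====
theorem get_prerow_sum_spec : Claim_equal_get_prerow_sum := by
  intro m _ _
  unfold Spec_get_prerow_sum
  rw [A_char, B_char]
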